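-- pv_equiv track=rewrite | github.com/lyl0521/lesson-0426 | homework/day05/homework01.py | check_lower
-- ===== SOURCE A (Python) =====
-- def check_lower(string):
--     lower = 0
--     upper = 0
--     for n in string:
--         if n.islower():
--             lower += 1
--         else:
--             upper +=1
--     return upper,lower
-- ===== SOURCE B (Python) =====
-- def check_lower(string):
--     counts = {}
--     for c in string:
--         counts[c] = counts.get(c, 0) + 1
--     lower = sum(k for c, k in counts.items() if c.islower())
--     upper = sum(k for c, k in counts.items() if not c.islower())
--     return upper, lower
-- ===== Notes on version B (the rewrite author's own statement) =====
-- stated objective: alternative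
-- what changed: B first builds a per-character frequency dictionary in one pass and then aggregates the counts over the distinct characters (islower is decided once per distinct character, not once per occurrence), replacing A's per-character if/else two-counter tally.
import Mathlib
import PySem

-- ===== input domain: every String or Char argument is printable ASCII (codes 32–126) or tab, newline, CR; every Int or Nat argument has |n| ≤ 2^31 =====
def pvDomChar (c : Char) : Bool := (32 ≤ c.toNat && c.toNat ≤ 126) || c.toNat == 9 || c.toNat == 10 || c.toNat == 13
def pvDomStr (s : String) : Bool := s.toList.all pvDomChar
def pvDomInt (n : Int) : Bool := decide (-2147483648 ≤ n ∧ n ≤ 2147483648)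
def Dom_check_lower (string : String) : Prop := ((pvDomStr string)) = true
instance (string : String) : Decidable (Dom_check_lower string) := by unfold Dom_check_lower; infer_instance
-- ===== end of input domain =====

-- B builds a per-character frequency dictionary in one pass and then sums the counts of the
-- distinct lowercase / non-lowercase characters, instead of A's per-character two-counter tally.

-- ===== PORT A =====
def check_lower (string : String) : Int × Int :=
  let st := string.toList.foldl
    (fun (acc : Int × Int) n => if PySem.Chars.islower n then (acc.1 + 1, acc.2) else (acc.1, acc.2 + 1))
    ((0 : Int), (0 : Int))
  (st.2, st.1)

-- ===== PORT B =====
def check_lower_alt (string : String) : Int × Int :=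
  let counts : PySem.Dict Char Int :=
    string.toList.foldl (fun d c => d.insert c (d.getD c 0 + 1)) PySem.Dict.empty
  let lower : Int := ((counts.items.filter (fun p => PySem.Chars.islower p.1)).map (·.2)).sum
  let upper : Int := ((counts.items.filter (fun p => !PySem.Chars.islower p.1)).map (·.2)).sum
  (upper, lower)

-- ===== PRECONDITION & SPEC =====
def Spec_check_lower (string : String) (out : Int × Int) : Prop := out = check_lower_alt string
instance (string : String) (out : Int × Int) : Decidable (Spec_check_lower string out) := by unfold Spec_check_lower; infer_instance

-- ===== CLAIM (what is proved, stated in full; the proofs are below) =====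
def Claim_equal_check_lower : Prop := ∀ (string : String), Dom_check_lower string → Spec_check_lower string (check_lower string)

-- ===== LEMMAS AND PROOFS =====
-- A's loop: the two counters are exactly the filtered lengths.
lemma foldl_counts (l : List Char) (a b : Int) :
    l.foldl (fun (acc : Int × Int) n => if PySem.Chars.islower n then (acc.1 + 1, acc.2) else (acc.1, acc.2 + 1)) (a, b)
      = (a + ((l.filter (fun c => PySem.Chars.islower c)).length : Int),
         b + ((l.filter (fun c => !PySem.Chars.islower c)).length : Int)) := by
  induction l generalizing a b with
  | nil => simp
  | cons c t ih =>
    simp only [List.foldl_cons, List.filter_cons]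
    by_cases h : PySem.Chars.islower c = true
    · simp [h, ih]; ring
    · simp [h, ih]; ring

-- Summing the multiplicities of the distinct characters satisfying p gives the filtered length.
lemma sum_counts (p : Char → Bool) (l : List Char) :
    (((PySem.Set.ofList l).filter p).map (fun k => ((l.count k : Int)))).sum
      = ((l.filter p).length : Int) := by
  have hperm : List.Perm (PySem.Set.ofList l) l.dedup := by
    rw [List.perm_ext_iff_of_nodup (PySem.Set.nodup_ofList l) l.nodup_dedup]
    intro a; simp [PySem.Set.mem_ofList]
  have h1 : (((PySem.Set.ofList l).filter p).map (fun k => ((l.count k : Int)))).sum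
      = (((l.dedup.filter p)).map (fun k => ((l.count k : Int)))).sum :=
    ((hperm.filter p).map _).sum_eq
  rw [h1]
  have h2 : ((l.dedup.filter p)).map (fun k => ((l.count k : Int)))
      = ((l.dedup.filter p).map l.count).map (fun n : ℕ => (n : Int)) := by
    simp [List.map_map, Function.comp]
  rw [h2, ← Nat.cast_list_sum, List.sum_map_count_dedup_filter_eq_countP, List.countP_eq_length_filter]

-- B's frequency dictionary, characterised: its items are the distinct characters with their counts.
lemma counts_items (l : List Char) :
    (l.foldl (fun d c => d.insert c (d.getD c 0 + 1)) PySem.Dict.empty).items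
      = (PySem.Set.ofList l).map (fun k => (k, (l.count k : Int))) := by
  rw [PySem.Dict.foldl_insert_getD_add_one_eq_counter, PySem.Dict.items_counter]

-- B's aggregation over the dictionary items, reduced to a filtered length of the input.
lemma b_side (q : Char → Bool) (l : List Char) :
    (((((PySem.Set.ofList l).map (fun k => (k, (l.count k : Int)))).filter (fun p => q p.1))).map (fun p => p.2)).sum
      = ((l.filter q).length : Int) := by
  rw [List.filter_map, List.map_map]
  simpa [Function.comp] using sum_counts q l

-- ===== VERDICT (by name: the statement is the Claim_ definition above) =====
theorem check_lower_spec : Claim_equal_check_lower := by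
  intro s _
  unfold Spec_check_lower check_lower check_lower_alt
  simp only [foldl_counts, counts_items]
  rw [b_side (fun c => PySem.Chars.islower c) s.toList,
      b_side (fun c => !PySem.Chars.islower c) s.toList]
  simp
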